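-- pv_equiv track=rewrite | github.com/gqmaguirejr/DiVA-tools | check_abstracts.py | count_stop_words
-- ===== SOURCE A (Python) =====
-- def count_stop_words(words, stop_words):
--     sum=0
--     for w in words:
--         # ignore acronyms
--         if w.isupper():
--             continue
--         if w.lower() in stop_words:
--             sum=sum+1
--     return sum
-- ===== SOURCE B (Python) =====
-- def count_stop_words(words, stop_words):
--     # Count eligible (non-acronym) lowered words once, then sum those counts
--     # over the distinct stop words.
--     counts = {}
--     for w in words:
--         if w.isupper():
--             continue
--         lw = w.lower()
--         counts[lw] = counts.get(lw, 0) + 1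
--     return sum(counts.get(s, 0) for s in set(stop_words))
-- ===== Notes on version B (the rewrite author's own statement) =====
-- stated objective: alternative
-- what changed: Instead of testing each word for membership in stop_words, B tallies the eligible lowered words into a dict in one pass and then sums those tallies over the distinct stop words.
import Mathlib
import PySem

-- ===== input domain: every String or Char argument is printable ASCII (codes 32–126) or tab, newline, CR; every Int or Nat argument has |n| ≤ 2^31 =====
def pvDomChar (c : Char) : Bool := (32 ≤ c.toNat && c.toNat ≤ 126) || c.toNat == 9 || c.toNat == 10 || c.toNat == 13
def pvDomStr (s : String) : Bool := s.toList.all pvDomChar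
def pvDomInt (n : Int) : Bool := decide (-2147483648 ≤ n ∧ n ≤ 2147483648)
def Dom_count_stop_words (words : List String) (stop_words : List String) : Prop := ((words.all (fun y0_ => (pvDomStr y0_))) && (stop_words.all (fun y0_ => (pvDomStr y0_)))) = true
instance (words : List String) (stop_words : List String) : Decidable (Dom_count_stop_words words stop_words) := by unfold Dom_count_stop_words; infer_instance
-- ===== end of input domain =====

-- B inverts the traversal: one counting pass over the words, then a sum over the
-- distinct stop words (alternative decomposition, no speed claim).


-- shared helper: Python str.isupper() — at least one cased char and no lowercase
-- cased char; exact on the ASCII domain (cased = letters)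
def pyStrIsupper (s : String) : Bool :=
  s.toList.any PySem.Chars.isupper && !s.toList.any PySem.Chars.islower

-- ===== PORT A =====
def count_stop_words (words : List String) (stop_words : List String) : Int :=
  words.foldl (fun sum w =>
    if pyStrIsupper w then sum
    else if stop_words.contains (PySem.Str.lower w) then sum + 1
    else sum) 0

-- ===== PORT B =====
def count_stop_words_alt (words : List String) (stop_words : List String) : Int :=
  let counts : PySem.Dict String Int :=
    words.foldl (fun d w =>
      if pyStrIsupper w then d
      else d.insert (PySem.Str.lower w) (d.getD (PySem.Str.lower w) 0 + 1))
      PySem.Dict.empty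
  -- sum over set(stop_words): order-independent, so iterating the Set list is exact
  (PySem.Set.ofList stop_words).foldl (fun acc s => acc + counts.getD s 0) 0

-- ===== PRECONDITION & SPEC =====
def Spec_count_stop_words (words : List String) (stop_words : List String) (out : Int) : Prop := out = count_stop_words_alt words stop_words
instance (words : List String) (stop_words : List String) (out : Int) : Decidable (Spec_count_stop_words words stop_words out) := by unfold Spec_count_stop_words; infer_instance

-- ===== CLAIM (what is proved, stated in full; the proofs are below) =====
def Claim_equal_count_stop_words : Prop := ∀ (words : List String) (stop_words : List String), Dom_count_stop_words words stop_words → Spec_count_stop_words words stop_words (count_stop_words words stop_words)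

-- ===== LEMMAS AND PROOFS =====

-- the eligible lowered words
def pvElig (words : List String) : List String :=
  (words.filter (fun w => !pyStrIsupper w)).map PySem.Str.lower

-- B's counting fold over words equals the counter fold over the eligible lowered words
theorem pvFold_elig (words : List String) (d : PySem.Dict String Int) :
    words.foldl (fun d w =>
      if pyStrIsupper w then d
      else d.insert (PySem.Str.lower w) (d.getD (PySem.Str.lower w) 0 + 1)) d
    = (pvElig words).foldl (fun d x => d.insert x (d.getD x 0 + 1)) d := by
  induction words generalizing d with
  | nil => rfl
  | cons w ws ih =>
    by_cases h : pyStrIsupper w = true <;>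
      simp [pvElig, List.filter_cons, h, ih] at *

-- summing an indicator over a nodup list
theorem pvSum_indicator (t : List String) (a : String) (ht : t.Nodup) :
    (t.map (fun s => if a = s then (1 : Int) else 0)).sum
      = (if a ∈ t then (1 : Int) else 0) := by
  induction t with
  | nil => simp
  | cons s rest ih =>
    rcases List.nodup_cons.mp ht with ⟨hs, hrest⟩
    by_cases h : a = s
    · subst h
      simp [ih hrest, hs]
    · simp [h, ih hrest]

-- sum of counts over a nodup list of keys = countP membership
theorem pvSum_count (l t : List String) (ht : t.Nodup) :
    (t.map (fun s => (l.count s : Int))).sum = (l.countP (fun x => t.contains x) : Int) := by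
  induction l with
  | nil => simp
  | cons a l ih =>
    have hmap : t.map (fun s => ((a :: l).count s : Int))
        = t.map (fun s => (l.count s : Int) + if a = s then (1 : Int) else 0) := by
      apply List.map_congr_left
      intro s _
      by_cases h : a = s <;> simp [List.count_cons, h]
    rw [hmap, List.sum_map_add, ih, pvSum_indicator t a ht]
    by_cases hm : a ∈ t <;> simp [hm] <;> push_cast <;> ring

-- ===== VERDICT (by name: the statement is the Claim_ definition above) =====
theorem count_stop_words_spec : Claim_equal_count_stop_words := by
  intro words stop_words _
  unfold Spec_count_stop_words count_stop_words count_stop_words_alt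
  -- B side: counting fold = counts of eligible lowered words, summed over set(stop_words)
  rw [pvFold_elig, PySem.List.foldl_add (g := fun s =>
    ((pvElig words).foldl (fun d x => d.insert x (d.getD x 0 + 1)) PySem.Dict.empty).getD s 0)]
  have hcnt : (PySem.Set.ofList stop_words).map (fun s =>
      ((pvElig words).foldl (fun d x => d.insert x (d.getD x 0 + 1)) PySem.Dict.empty).getD s 0)
      = (PySem.Set.ofList stop_words).map (fun s => ((pvElig words).count s : Int)) := by
    apply List.map_congr_left
    intro s _
    rw [PySem.Dict.getD_foldl_insert_add_one]
    simp [PySem.Dict.getD, PySem.Dict.get?, PySem.Dict.empty]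
  rw [hcnt, pvSum_count _ _ (PySem.Set.nodup_ofList stop_words)]
  -- A side: the loop is a countP over the eligible lowered words
  have hflip : words.foldl (fun (sum : Int) w =>
      if pyStrIsupper w then sum
      else if stop_words.contains (PySem.Str.lower w) then sum + 1
      else sum) 0
      = words.foldl (fun (sum : Int) w =>
      if !pyStrIsupper w then
        (if stop_words.contains (PySem.Str.lower w) then sum + 1 else sum)
      else sum) 0 := by
    apply PySem.List.foldl_congr_mem
    intro acc w _
    by_cases h : pyStrIsupper w = true <;> simp [h]
  rw [hflip]
  rw [PySem.List.foldl_if_eq_foldl_filter (p := fun w => !pyStrIsupper w)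
    (f := fun sum w => if stop_words.contains (PySem.Str.lower w) then sum + 1 else sum)]
  rw [PySem.List.foldl_if_add_one]
  have : (List.countP (fun w => stop_words.contains (PySem.Str.lower w))
        (words.filter fun w => !pyStrIsupper w))
      = List.countP (fun x => stop_words.contains x) (pvElig words) := by
    simp [pvElig, List.countP_map, Function.comp_def]
  rw [this]
  have : List.countP (fun x => stop_words.contains x) (pvElig words)
      = List.countP (fun x => (PySem.Set.ofList stop_words).contains x) (pvElig words) := by
    apply List.countP_congr
    intro x _
    simp [PySem.Set.mem_ofList]
  rw [this]
  rfl
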